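-- pv_equiv track=rewrite | github.com/asherthechamp/Coding-Problems | Problem Set Two/tiles_possibilities.py | part_perm
-- ===== SOURCE A (Python) =====
-- def part_perm(perm, s):
--     count = 0
--     for i in range (1, len(s) + 1):
--         array =[]
--         for p in perm:
--             array.append("".join(list(p)[:i]))
--         count += len(set(array))
--     return count
-- ===== SOURCE B (Python) =====
-- def part_perm(perm, s):
--     # One pass per string: grow each joined prefix incrementally and insert it
--     # into a per-depth set, instead of re-slicing and re-joining for every depth.
--     n = len(s)
--     sets = [set() for _ in range(n)]
--     for p in perm:
--         acc = ""
--         for i in range(n):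
--             if i < len(p):
--                 acc += p[i]
--             sets[i].add(acc)
--     return sum(len(t) for t in sets)
-- ===== Notes on version B (the rewrite author's own statement) =====
-- stated objective: faster
-- what changed: Instead of re-slicing and re-joining every prefix for every depth i (rebuilding each joined string from scratch, depth-major), B makes one pass per string, growing its joined prefix incrementally and inserting it into a per-depth set, then sums the set sizes.
import Mathlib
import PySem

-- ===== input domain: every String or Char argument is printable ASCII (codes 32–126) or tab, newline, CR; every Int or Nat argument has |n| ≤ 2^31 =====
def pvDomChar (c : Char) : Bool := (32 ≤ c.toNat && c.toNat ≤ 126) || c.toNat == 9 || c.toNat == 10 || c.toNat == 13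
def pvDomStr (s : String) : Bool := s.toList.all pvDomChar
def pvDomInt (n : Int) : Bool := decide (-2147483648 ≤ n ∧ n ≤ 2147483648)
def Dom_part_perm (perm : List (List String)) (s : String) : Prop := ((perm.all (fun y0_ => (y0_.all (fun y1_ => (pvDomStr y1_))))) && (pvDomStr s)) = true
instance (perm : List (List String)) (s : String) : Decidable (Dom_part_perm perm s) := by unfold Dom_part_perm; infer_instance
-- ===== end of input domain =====

-- B replaces A's per-depth re-slice-and-join (rebuilding every joined prefix from scratch
-- for every depth) by a single pass per string that grows the joined prefix incrementally
-- and inserts it into a per-depth set; objective: a different, faster-by-mechanism traversal.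

-- ===== PORT A =====
def part_perm (perm : List (List String)) (s : String) : Int :=
  (PySem.List.pyRange 1 (PySem.Str.len s + 1) 1).foldl
    (fun count i =>
      let array : List String :=
        perm.foldl (fun arr p => arr ++ [PySem.Str.join "" (PySem.List.slice p none (some i))]) []
      count + PySem.Set.len (PySem.Set.ofList array)) 0

-- ===== PORT B =====
-- body of Source B's inner loop: 'if i < len(p): acc += p[i]' then 'sets[i].add(acc)'
-- (the Python str acc is represented as a List Char; '+=' is list append, exact on all ASCII)
def altStep (p : List String) (st : List Char × List (PySem.Set (List Char))) (i : Int) :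
    List Char × List (PySem.Set (List Char)) :=
  let acc := if i < (p.length : Int) then st.1 ++ (PySem.List.pyGetD p i "").toList else st.1
  (acc, PySem.List.pySetD st.2 i (PySem.Set.add (PySem.List.pyGetD st.2 i PySem.Set.empty) acc))

def part_perm_alt (perm : List (List String)) (s : String) : Int :=
  let n : Int := PySem.Str.len s
  let sets0 : List (PySem.Set (List Char)) := (PySem.List.pyRange 0 n 1).map (fun _ => PySem.Set.empty)
  let sets := perm.foldl (fun sets p => ((PySem.List.pyRange 0 n 1).foldl (altStep p) ([], sets)).2) sets0
  (sets.map (fun t => PySem.Set.len t)).sum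

-- ===== PRECONDITION & SPEC =====
def Spec_part_perm (perm : List (List String)) (s : String) (out : Int) : Prop := out = part_perm_alt perm s
instance (perm : List (List String)) (s : String) (out : Int) : Decidable (Spec_part_perm perm s out) := by unfold Spec_part_perm; infer_instance

-- ===== CLAIM (what is proved, stated in full; the proofs are below) =====
def Claim_equal_part_perm : Prop := ∀ (perm : List (List String)) (s : String), Dom_part_perm perm s → Spec_part_perm perm s (part_perm perm s)

-- ===== LEMMAS AND PROOFS =====

-- the joined prefix of depth k: ''.join(p[:k]) as a character list
def pref (p : List String) (k : Nat) : List Char := ((p.take k).map String.toList).flatten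

theorem pref_succ (p : List String) (k : Nat) :
    pref p (k + 1) = if k < p.length then pref p k ++ (p.getD k "").toList else pref p k := by
  unfold pref
  by_cases h : k < p.length
  · rw [if_pos h, List.take_add_one, List.getElem?_eq_getElem h]
    rw [List.getD_eq_getElem?_getD, List.getElem?_eq_getElem h]
    simp only [Option.toList_some, List.map_append, List.flatten_append, List.map_cons,
      List.map_nil, List.flatten_cons, List.flatten_nil, List.append_nil, Option.getD_some]
  · rw [if_neg h, List.take_add_one, List.getElem?_eq_none_iff.mpr (by omega)]
    simp

theorem inner_loop (p : List String) (n : Nat) :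
    ∀ (m k : Nat) (sets : List (PySem.Set (List Char))), k + m = n → sets.length = n →
    ((PySem.List.pyRange (k : Int) (n : Int) 1).foldl (altStep p) (pref p k, sets)).2
      = sets.zipIdx.map (fun ti => if k ≤ ti.2 then ti.1.add (pref p (ti.2 + 1)) else ti.1) := by
  intro m
  induction m with
  | zero =>
    intro k sets hk hlen
    rw [PySem.List.pyRange_one_eq_nil (by omega)]
    simp only [List.foldl_nil]
    apply List.ext_getElem (by simp)
    intro i h1 h2
    simp only [List.getElem_map, List.getElem_zipIdx, Nat.zero_add]
    have hi : i < sets.length := by simpa using h1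
    rw [if_neg (by omega)]
  | succ m ih =>
    intro k sets hk hlen
    rw [PySem.List.pyRange_one_cons (by omega : (k:Int) < (n:Int))]
    rw [List.foldl_cons]
    have hstep : altStep p (pref p k, sets) (k : Int)
        = (pref p (k+1), sets.set k ((sets.getD k PySem.Set.empty).add (pref p (k+1)))) := by
      unfold altStep
      simp only [PySem.List.pyGetD_natCast, PySem.List.pySetD_natCast]
      rw [pref_succ]
      by_cases h : k < p.length
      · rw [if_pos h, if_pos (by exact_mod_cast h)]
      · rw [if_neg h, if_neg (by exact_mod_cast h)]
    rw [hstep]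
    have : ((k:Int) + 1) = ((k+1 : Nat) : Int) := by push_cast; ring
    rw [this, ih (k+1) _ (by omega) (by simp [hlen])]
    apply List.ext_getElem (by simp)
    intro i h1 h2
    simp only [List.getElem_map, List.getElem_zipIdx, Nat.zero_add]
    have hi : i < sets.length := by simpa using h1
    by_cases hik : i = k
    · subst hik
      rw [if_neg (by omega), if_pos (le_refl _), List.getElem_set_self]
      rw [List.getD_eq_getElem?_getD, List.getElem?_eq_getElem hi]
      rfl
    · rw [List.getElem_set_ne (by omega)]
      by_cases hki : k ≤ i
      · rw [if_pos (by omega), if_pos hki]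
      · rw [if_neg (by omega), if_neg hki]

theorem join_nil_flatten (l : List (List Char)) : PySem.Chars.join [] l = l.flatten := by
  induction l with
  | nil => rfl
  | cons x xs ih =>
    cases xs with
    | nil => show [].intercalate [x] = _ ; simp [List.intercalate]
    | cons y ys =>
      calc PySem.Chars.join [] (x :: y :: ys) = x ++ PySem.Chars.join [] (y :: ys) := by
            show [].intercalate _ = x ++ [].intercalate _
            simp [List.intercalate, List.intersperse]
          _ = x ++ (y :: ys).flatten := by rw [ih]
          _ = (x :: y :: ys).flatten := by simp

theorem pref_eq_toList_join (p : List String) (k : Nat) :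
    pref p k = (PySem.Str.join "" (p.take k)).toList := by
  rw [PySem.Str.toList_join, show ("".toList) = ([] : List Char) from rfl, join_nil_flatten]
  rfl

theorem ofList_map_toList (xs : List String) :
    PySem.Set.ofList (xs.map String.toList) = (PySem.Set.ofList xs).map String.toList := by
  induction xs using List.reverseRecOn with
  | nil => rfl
  | append_singleton ys y ih =>
    rw [List.map_append, List.map_singleton, PySem.Set.ofList_append_singleton,
        PySem.Set.ofList_append_singleton, ih, PySem.Set.add_eq_ite, PySem.Set.add_eq_ite]
    by_cases hy : y ∈ PySem.Set.ofList ys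
    · rw [if_pos (List.mem_map_of_mem hy), if_pos hy]
    · rw [if_neg (by
        intro hmem
        obtain ⟨z, hz, hzy⟩ := List.mem_map.mp hmem
        exact hy (String.toList_inj.mp hzy ▸ hz)), if_neg hy, List.map_append]
      rfl

theorem outer_loop (n : Nat) (perm : List (List String)) :
    ∀ (sets : List (PySem.Set (List Char))), sets.length = n →
    perm.foldl (fun sets p => ((PySem.List.pyRange 0 (n : Int) 1).foldl (altStep p) ([], sets)).2) sets
      = sets.zipIdx.map (fun ti => perm.foldl (fun t p => t.add (pref p (ti.2 + 1))) ti.1) := by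
  induction perm with
  | nil =>
    intro sets hlen
    simp only [List.foldl_nil]
    apply List.ext_getElem (by simp)
    intro i h1 h2
    simp
  | cons p perm ih =>
    intro sets hlen
    have hF : ((PySem.List.pyRange 0 (n : Int) 1).foldl (altStep p) ([], sets)).2
        = sets.zipIdx.map (fun ti => ti.1.add (pref p (ti.2 + 1))) := by
      have h0 : ((0:Nat):Int) = (0:Int) := rfl
      have hil := inner_loop p n n 0 sets (by omega) hlen
      rw [h0] at hil
      rw [show (pref p 0) = ([] : List Char) from rfl] at hil
      rw [hil]
      apply List.map_congr_left
      intro ti _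
      rw [if_pos (Nat.zero_le _)]
    simp only [List.foldl_cons, hF]
    rw [ih _ (by simp [hlen])]
    apply List.ext_getElem (by simp)
    intro i h1 h2
    simp only [List.getElem_map, List.getElem_zipIdx, Nat.zero_add]

theorem part_perm_eq (perm : List (List String)) (s : String) :
    part_perm perm s = part_perm_alt perm s := by
  unfold part_perm part_perm_alt
  set n : Nat := s.toList.length with hn
  have hlen : PySem.Str.len s = (n : Int) := PySem.Str.len_eq s
  simp only [hlen]
  -- A side
  simp only [PySem.List.foldl_append_singleton_eq_map, List.nil_append]
  rw [PySem.List.foldl_add]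
  rw [PySem.List.pyRange_one]
  have hmn : ((n : Int) + 1 - 1).toNat = n := by omega
  rw [hmn, zero_add, List.map_map]
  -- B side
  have hs0len : ((PySem.List.pyRange 0 (n:Int) 1).map
      (fun _ => (PySem.Set.empty : PySem.Set (List Char)))).length = n := by
    simp [PySem.List.length_pyRange_one]
  rw [outer_loop n perm _ hs0len]
  rw [List.map_map]
  apply congrArg List.sum
  apply List.ext_getElem (by simp [PySem.List.length_pyRange_one])
  intro i h1 h2
  simp only [List.getElem_map, List.getElem_zipIdx, List.getElem_range, Function.comp_apply,
    Nat.zero_add]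
  rw [← PySem.Set.update_map_eq_foldl_add, PySem.Set.update_empty]
  have hcast : (1 + (i:Int)) = (((i+1:Nat)):Int) := by push_cast; ring
  simp only [hcast, PySem.List.slice_to_natCast]
  have hpref : (fun p => pref p (i+1)) = (fun p : List String => (PySem.Str.join "" (p.take (i+1))).toList) :=
    funext (fun p => pref_eq_toList_join p (i+1))
  rw [hpref]
  rw [show (List.map (fun p : List String => (PySem.Str.join "" (p.take (i+1))).toList) perm)
      = (perm.map (fun p : List String => PySem.Str.join "" (p.take (i+1)))).map String.toList by
    rw [List.map_map]; rfl]
  rw [ofList_map_toList]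
  show _ = (((PySem.Set.ofList _).map String.toList).length : Int)
  rw [List.length_map]
  rfl

-- ===== VERDICT (by name: the statement is the Claim_ definition above) =====
theorem part_perm_spec : Claim_equal_part_perm := by
  intro perm s _
  unfold Spec_part_perm
  exact part_perm_eq perm s
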